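-- pv_equiv track=rewrite | github.com/killTell/HeadFuckLang | source/parsing/get_line.py | divide_into_parts
-- ===== SOURCE A (Python) =====
-- from string import ascii_lowercase, ascii_uppercase
--
-- _alphabet = ascii_lowercase+ascii_uppercase+"1234567890"
--
-- def divide_into_parts(line):
-- 	result = []
-- 	string = ""
-- 	for symbol in line:
-- 		if symbol in _alphabet:
-- 			string += symbol
--
-- 		else:
-- 			result.append(string)
-- 			string = ''
-- 			string += symbol
-- 			result.append(string)
-- 			string = ''
--
-- 	return result
-- ===== SOURCE B (Python) =====
-- from string import ascii_lowercase, ascii_uppercase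
--
-- _alphabet = ascii_lowercase + ascii_uppercase + "1234567890"
--
-- def divide_into_parts(line):
--     seps = [(i, c) for i, c in enumerate(line) if c not in _alphabet]
--     starts = [0] + [i + 1 for i, _ in seps]
--     return [part for start, (i, c) in zip(starts, seps)
--                  for part in (line[start:i], c)]
-- ===== Notes on version B (the rewrite author's own statement) =====
-- stated objective: alternative
-- what changed: Replaces A's single-pass character-buffer accumulation by a two-pass scheme: first enumerate the separator positions, then build the output by zipping token start positions with separators and slicing the line.
import Mathlib
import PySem

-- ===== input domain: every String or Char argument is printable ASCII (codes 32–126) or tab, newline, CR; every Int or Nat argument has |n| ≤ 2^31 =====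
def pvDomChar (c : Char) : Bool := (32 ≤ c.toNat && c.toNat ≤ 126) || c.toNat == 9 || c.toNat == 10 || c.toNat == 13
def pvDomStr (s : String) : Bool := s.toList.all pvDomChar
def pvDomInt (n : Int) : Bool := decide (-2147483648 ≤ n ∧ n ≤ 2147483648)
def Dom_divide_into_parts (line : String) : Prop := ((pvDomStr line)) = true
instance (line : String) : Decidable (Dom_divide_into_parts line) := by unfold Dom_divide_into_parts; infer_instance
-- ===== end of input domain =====

-- B replaces A's char-by-char buffer accumulation by a two-pass scheme: list the
-- separator positions once, then emit each token by slicing (objective: alternative).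

-- _alphabet = ascii_lowercase + ascii_uppercase + "1234567890" (shared by both Pythons)
def pvAlphabet : List Char :=
  "abcdefghijklmnopqrstuvwxyzABCDEFGHIJKLMNOPQRSTUVWXYZ1234567890".toList

-- ===== PORT A =====
def divide_into_parts (line : String) : List String :=
  (line.toList.foldl
    (fun st c =>
      if pvAlphabet.contains c then (st.1, st.2.push c)
      else (st.1 ++ [st.2, String.ofList [c]], ""))
    (([] : List String), "")).1

-- ===== PORT B =====
def divide_into_parts_alt (line : String) : List String :=
  let cs := line.toList
  let seps := (PySem.List.enumerate cs).filter (fun p => !(pvAlphabet.contains p.2))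
  let starts := (0 : Int) :: seps.map (fun p => p.1 + 1)
  (starts.zip seps).flatMap
    (fun q => [String.ofList (PySem.List.slice cs (some q.1) (some q.2.1)), String.ofList [q.2.2]])

-- ===== PRECONDITION & SPEC =====
def Spec_divide_into_parts (line : String) (out : List String) : Prop := out = divide_into_parts_alt line
instance (line : String) (out : List String) : Decidable (Spec_divide_into_parts line out) := by unfold Spec_divide_into_parts; infer_instance

-- ===== CLAIM (what is proved, stated in full; the proofs are below) =====
def Claim_equal_divide_into_parts : Prop := ∀ (line : String), Dom_divide_into_parts line → Spec_divide_into_parts line (divide_into_parts line)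

-- ===== LEMMAS AND PROOFS =====

-- A's loop as structural recursion with an explicit list buffer
def gL (b : List Char) : List Char → List String
  | [] => []
  | c :: cs =>
      if pvAlphabet.contains c then gL (b ++ [c]) cs
      else String.ofList b :: String.ofList [c] :: gL [] cs

lemma foldA (cs : List Char) : ∀ (res : List String) (s : String),
    (cs.foldl
      (fun st c =>
        if pvAlphabet.contains c then (st.1, st.2.push c)
        else (st.1 ++ [st.2, String.ofList [c]], ""))
      (res, s)).1 = res ++ gL s.toList cs := by
  induction cs with
  | nil => intro res s; simp [gL]
  | cons c cs ih =>
      intro res s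
      by_cases h : c ∈ pvAlphabet
      · simpa [List.foldl_cons, h, gL] using ih res (s.push c)
      · simpa [List.foldl_cons, h, gL] using ih (res ++ [s, String.ofList [c]]) ""

lemma LB (cs : List Char) : ∀ (k : Nat) (b : List Char) (full : List Char),
    full.drop (k - b.length) = b ++ cs → b.length ≤ k →
    ((((k - b.length : Nat) : Int) ::
        ((PySem.List.enumerate cs (k : Int)).filter (fun p => !(pvAlphabet.contains p.2))).map
          (fun p => p.1 + 1)).zip
      ((PySem.List.enumerate cs (k : Int)).filter (fun p => !(pvAlphabet.contains p.2)))).flatMap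
      (fun q => [String.ofList (PySem.List.slice full (some q.1) (some q.2.1)), String.ofList [q.2.2]])
    = gL b cs := by
  induction cs with
  | nil => intro k b full _ _; simp [PySem.List.enumerate_nil, gL]
  | cons c cs ih =>
      intro k b full hdrop hle
      have h1 : ((k : Int)) + 1 = ((k + 1 : Nat) : Int) := by push_cast; ring
      by_cases h : c ∈ pvAlphabet
      · -- word char: it joins the buffer
        have hlen : (k + 1) - (b ++ [c]).length = k - b.length := by
          simp
        have hi := ih (k + 1) (b ++ [c]) full
          (by rw [hlen, hdrop]; simp) (by simp; omega)
        rw [hlen] at hi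
        rw [← h1] at hi
        simpa [PySem.List.enumerate_cons, h, gL] using hi
      · -- separator: emit the buffered token and the separator
        have hs : PySem.List.slice full (some ((k - b.length : Nat) : Int)) (some (k : Int))
            = b := by
          rw [PySem.List.slice_natCast, hdrop]
          have h2 : k - (k - b.length) = b.length := by omega
          rw [h2]; simp
        have hfull : full.drop (k + 1) = cs := by
          have h2 : full.drop ((k - b.length) + (b.length + 1)) = cs := by
            rw [← List.drop_drop, hdrop]; simp
          have h3 : (k - b.length) + (b.length + 1) = k + 1 := by omega
          rwa [h3] at h2
        have htail := ih (k + 1) [] full (by simpa using hfull) (by simp)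
        simp only [List.length_nil, Nat.sub_zero] at htail
        rw [← h1] at htail
        simp at htail
        simp [PySem.List.enumerate_cons, h, gL, hs, htail]

-- ===== VERDICT (by name: the statement is the Claim_ definition above) =====
theorem divide_into_parts_spec : Claim_equal_divide_into_parts := by
  intro line _
  unfold Spec_divide_into_parts divide_into_parts divide_into_parts_alt
  rw [foldA line.toList [] ""]
  have := LB line.toList 0 [] line.toList (by simp) (by simp)
  simpa using this.symm
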